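-- pv_equiv track=rewrite | github.com/navbharatwaters/rag-enterprise-saas | src/documents/chunker.py | _find_page_for_position
-- ===== SOURCE A (Python) =====
-- def _find_page_for_position(pages: list[dict], char_position: int) -> int | None:
--     """Find which page a character position belongs to.
--
--     Pages are expected to have a 'text' field with page content.
--     Returns 1-indexed page number.
--     """
--     if not pages:
--         return None
--
--     cumulative = 0
--     for i, page in enumerate(pages):
--         page_length = len(page.get("text", ""))
--         if cumulative + page_length > char_position:
--             return i + 1
--         cumulative += page_length
--
--     return None
-- ===== SOURCE B (Python) =====
-- def _find_page_for_position(pages: list[dict], char_position: int) -> int | None: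
--     """Find which page a character position belongs to (1-indexed).
--
--     Builds the inclusive prefix-sum list of page text lengths once, then
--     binary-searches for the first prefix strictly greater than char_position.
--     """
--     if not pages:
--         return None
--
--     prefix = []
--     total = 0
--     for page in pages:
--         total += len(page.get("text", ""))
--         prefix.append(total)
--
--     lo, hi = 0, len(prefix)
--     while lo < hi:
--         mid = (lo + hi) // 2
--         if prefix[mid] <= char_position:
--             lo = mid + 1
--         else:
--             hi = mid
--
--     return lo + 1 if lo < len(pages) else None
-- ===== Notes on version B (the rewrite author's own statement) =====
-- stated objective: alternative
-- what changed: B builds the inclusive prefix-sum list of page text lengths once and then binary-searches it (bisect_right semantics) for the first cumulative length strictly exceeding char_position, instead of A's single accumulating early-return scan.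
import Mathlib
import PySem

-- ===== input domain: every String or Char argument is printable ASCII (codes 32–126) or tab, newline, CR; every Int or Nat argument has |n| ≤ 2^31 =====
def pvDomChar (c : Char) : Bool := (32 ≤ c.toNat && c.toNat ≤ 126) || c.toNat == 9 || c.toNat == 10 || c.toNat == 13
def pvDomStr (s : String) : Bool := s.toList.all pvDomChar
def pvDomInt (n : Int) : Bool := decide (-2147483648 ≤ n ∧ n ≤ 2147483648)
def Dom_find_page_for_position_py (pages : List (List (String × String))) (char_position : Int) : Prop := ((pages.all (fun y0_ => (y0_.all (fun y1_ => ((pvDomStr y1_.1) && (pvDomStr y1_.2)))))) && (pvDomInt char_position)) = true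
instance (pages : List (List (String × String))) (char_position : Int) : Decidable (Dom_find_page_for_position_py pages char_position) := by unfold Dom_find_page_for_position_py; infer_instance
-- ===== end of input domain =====

-- B replaces A's single accumulating scan by a prefix-sum list plus a binary search
-- for the first cumulative length exceeding char_position (objective: alternative).


-- len(page.get("text", "")) — dict lookup (first match in the association list) then string length
def pvPageLen (page : List (String × String)) : Int :=
  PySem.Str.len ((page.lookup "text").getD "")

-- ===== PORT A =====
-- the 'for i, page in enumerate(pages)' loop carrying cumulative and i
def pvLoopA (l : List (List (String × String))) (x cum i : Int) : Option Int :=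
  match l with
  | [] => none
  | p :: rest =>
      if cum + pvPageLen p > x then some (i + 1)
      else pvLoopA rest x (cum + pvPageLen p) (i + 1)

def find_page_for_position_py (pages : List (List (String × String))) (char_position : Int) : Option Int :=
  if pages.isEmpty then none
  else pvLoopA pages char_position 0 0

-- ===== PORT B =====
-- the prefix-building loop: inclusive cumulative lengths
def pvPrefix (l : List (List (String × String))) (total : Int) : List Int :=
  match l with
  | [] => []
  | p :: rest => (total + pvPageLen p) :: pvPrefix rest (total + pvPageLen p)

-- the while lo < hi binary-search loop of Source B
def pvBisect (a : List Int) (x : Int) (lo hi : Nat) : Nat :=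
  if h : lo < hi then
    let mid := (lo + hi) / 2
    if a.getD mid 0 ≤ x then pvBisect a x (mid + 1) hi
    else pvBisect a x lo mid
  else lo
termination_by hi - lo
decreasing_by all_goals omega

def find_page_for_position_py_alt (pages : List (List (String × String))) (char_position : Int) : Option Int :=
  if pages.isEmpty then none
  else
    let pfx := pvPrefix pages 0
    let lo := pvBisect pfx char_position 0 pfx.length
    if lo < pages.length then some ((lo : Int) + 1) else none

-- ===== PRECONDITION & SPEC =====
def Spec_find_page_for_position_py (pages : List (List (String × String))) (char_position : Int) (out : Option Int) : Prop := out = find_page_for_position_py_alt pages char_position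
instance (pages : List (List (String × String))) (char_position : Int) (out : Option Int) : Decidable (Spec_find_page_for_position_py pages char_position out) := by unfold Spec_find_page_for_position_py; infer_instance

-- ===== CLAIM (what is proved, stated in full; the proofs are below) =====
def Claim_equal_find_page_for_position_py : Prop := ∀ (pages : List (List (String × String))) (char_position : Int), Dom_find_page_for_position_py pages char_position → Spec_find_page_for_position_py pages char_position (find_page_for_position_py pages char_position)

-- ===== LEMMAS AND PROOFS =====

-- number of leading elements ≤ x: the common characterisation of both searches
def pvCnt (a : List Int) (x : Int) : Nat :=
  match a with
  | [] => 0
  | v :: r => if v ≤ x then pvCnt r x + 1 else 0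

theorem pvCnt_le_length (a : List Int) (x : Int) : pvCnt a x ≤ a.length := by
  induction a with
  | nil => simp [pvCnt]
  | cons v r ih => simp only [pvCnt, List.length_cons]; split <;> omega

theorem pvCnt_getD_le (a : List Int) (x : Int) (j : Nat) (hj : j < pvCnt a x) :
    a.getD j 0 ≤ x := by
  induction a generalizing j with
  | nil => simp [pvCnt] at hj
  | cons v r ih =>
      simp only [pvCnt] at hj
      by_cases hv : v ≤ x
      · simp only [hv, if_true] at hj
        cases j with
        | zero => simpa using hv
        | succ k => simpa using ih k (by omega)
      · simp [hv] at hj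

theorem pvCnt_getD_gt (a : List Int) (x : Int) (h : pvCnt a x < a.length) :
    x < a.getD (pvCnt a x) 0 := by
  induction a with
  | nil => simp at h
  | cons v r ih =>
      simp only [pvCnt] at *
      by_cases hv : v ≤ x
      · simp only [hv, if_true] at h ⊢
        simpa using ih (by simpa using h)
      · simp [hv]; omega

theorem pvPageLen_nonneg (p : List (String × String)) : 0 ≤ pvPageLen p := by
  simp [pvPageLen, PySem.Str.len_eq]

theorem pvPrefix_lb (l : List (List (String × String))) (total : Int)
    (v : Int) (hv : v ∈ pvPrefix l total) : total ≤ v := by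
  induction l generalizing total with
  | nil => simp [pvPrefix] at hv
  | cons p rest ih =>
      simp only [pvPrefix, List.mem_cons] at hv
      rcases hv with h | h
      · have := pvPageLen_nonneg p; omega
      · have := ih (total + pvPageLen p) h
        have := pvPageLen_nonneg p; omega

theorem pvPrefix_pairwise (l : List (List (String × String))) (total : Int) :
    List.Pairwise (· ≤ ·) (pvPrefix l total) := by
  induction l generalizing total with
  | nil => simp [pvPrefix]
  | cons p rest ih =>
      simp only [pvPrefix]
      refine List.pairwise_cons.mpr ⟨?_, ih _⟩
      intro v hv
      exact pvPrefix_lb rest (total + pvPageLen p) v hv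

theorem pv_mono {a : List Int} (hs : List.Pairwise (· ≤ ·) a)
    {i j : Nat} (hij : i ≤ j) (hj : j < a.length) : a.getD i 0 ≤ a.getD j 0 := by
  rcases Nat.eq_or_lt_of_le hij with rfl | hlt
  · exact le_refl _
  · have h := (List.pairwise_iff_getElem.mp hs) i j (by omega) hj hlt
    rw [List.getD_eq_getElem a 0 (by omega), List.getD_eq_getElem a 0 hj]
    exact h

theorem pvBisect_eq_cnt (a : List Int) (x : Int) (hs : List.Pairwise (· ≤ ·) a)
    (lo hi : Nat) (hlo : lo ≤ pvCnt a x) (hhi : pvCnt a x ≤ hi) (hlen : hi ≤ a.length) :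
    pvBisect a x lo hi = pvCnt a x := by
  by_cases h : lo < hi
  · rw [pvBisect]
    simp only [h, dif_pos]
    set mid := (lo + hi) / 2 with hmid
    have hmlt : mid < hi := by omega
    have hmlen : mid < a.length := by omega
    by_cases hc : a.getD mid 0 ≤ x
    · -- mid is below the boundary: pvCnt a x > mid
      have : mid < pvCnt a x := by
        by_contra hmc
        have h1 : x < a.getD (pvCnt a x) 0 := pvCnt_getD_gt a x (by omega)
        have h2 := pv_mono hs (Nat.le_of_not_lt hmc) hmlen
        omega
      simp only [hc, if_true]
      exact pvBisect_eq_cnt a x hs (mid + 1) hi (by omega) hhi hlen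
    · have : pvCnt a x ≤ mid := by
        by_contra hmc
        exact hc (pvCnt_getD_le a x mid (by omega))
      simp only [hc, if_false]
      exact pvBisect_eq_cnt a x hs lo mid hlo this (by omega)
  · rw [pvBisect]
    simp only [h, dif_neg, not_false_iff]
    omega
termination_by hi - lo
decreasing_by all_goals omega

theorem pvLoopA_eq (l : List (List (String × String))) (x : Int) :
    ∀ (cum i : Int), pvLoopA l x cum i =
      (if pvCnt (pvPrefix l cum) x < l.length
       then some (i + (pvCnt (pvPrefix l cum) x : Int) + 1) else none) := by
  induction l with
  | nil => intro cum i; simp [pvLoopA, pvPrefix, pvCnt]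
  | cons p rest ih =>
      intro cum i
      simp only [pvLoopA, pvPrefix, pvCnt, List.length_cons]
      by_cases hgt : cum + pvPageLen p > x
      · have hle : ¬ (cum + pvPageLen p ≤ x) := by omega
        simp [hgt, hle]
      · have hle : cum + pvPageLen p ≤ x := by omega
        rw [if_neg hgt, ih (cum + pvPageLen p) (i + 1)]
        simp only [hle, if_true]
        by_cases hc : pvCnt (pvPrefix rest (cum + pvPageLen p)) x < rest.length
        · rw [if_pos hc, if_pos (by omega)]
          congr 1
          push_cast
          ring
        · rw [if_neg hc, if_neg (by omega)]

-- ===== VERDICT (by name: the statement is the Claim_ definition above) =====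
theorem find_page_for_position_py_spec : Claim_equal_find_page_for_position_py := by
  intro pages x _
  show find_page_for_position_py pages x = find_page_for_position_py_alt pages x
  unfold find_page_for_position_py find_page_for_position_py_alt
  by_cases hp : pages.isEmpty
  · simp [hp]
  · simp only [hp, if_false, Bool.false_eq_true]
    rw [pvLoopA_eq pages x 0 0]
    have hb := pvBisect_eq_cnt (pvPrefix pages 0) x (pvPrefix_pairwise pages 0)
      0 (pvPrefix pages 0).length (Nat.zero_le _)
      (pvCnt_le_length _ _) (le_refl _)
    rw [hb]
    split <;> [skip; rfl]
    congr 1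
    ring
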